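-- pv_equiv track=rewrite | github.com/PapNorbert/Cryptography | lab2/streamEncryption.py | blumBlumShub
-- ===== SOURCE A (Python) =====
-- def blumBlumShub(currentValue):
--     p = 1898749
--     q = 19891
--     # p*q % 4 == 3
--     newValue = int(currentValue)
--     bits = []
--     for i in range(8):
--         newValue = pow(newValue, 2) % (p * q)
--         bits.append(newValue % 2)
--     randValue = valueFromBits(bits)
--     return newValue, randValue
--
-- def valueFromBits(bits):
--     out = 0
--     for bit in bits:
--         out = (out << 1) | bit
--     return out
-- ===== SOURCE B (Python) =====
-- def blumBlumShub(currentValue):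
--     m = 1898749 * 19891
--     x = int(currentValue)
--     newValue = pow(x, 256, m)
--     randValue = sum((pow(x, 2 ** (i + 1), m) % 2) * 2 ** (7 - i) for i in range(8))
--     return newValue, randValue
-- ===== Notes on version B (the rewrite author's own statement) =====
-- stated objective: alternative
-- what changed: B replaces A's stateful squaring chain plus bits-list-and-fold with closed-form modular exponentiation: each output bit is an independent built-in three-argument pow of the seed taken mod two and summed with its place value, and newValue is one direct modular power of the seed.
import Mathlib
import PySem

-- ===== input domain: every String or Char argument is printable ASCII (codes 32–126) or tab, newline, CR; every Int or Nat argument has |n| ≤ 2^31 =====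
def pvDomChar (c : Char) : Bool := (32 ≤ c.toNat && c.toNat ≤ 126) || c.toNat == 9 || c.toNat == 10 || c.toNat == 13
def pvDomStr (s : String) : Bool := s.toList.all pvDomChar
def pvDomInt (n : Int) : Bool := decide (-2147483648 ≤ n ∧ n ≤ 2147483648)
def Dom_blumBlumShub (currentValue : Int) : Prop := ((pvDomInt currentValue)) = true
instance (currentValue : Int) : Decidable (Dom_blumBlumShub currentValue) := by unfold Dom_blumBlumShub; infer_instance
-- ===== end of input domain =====

-- B computes each BBS output bit in closed form as pow(x, 2**(i+1), m) % 2 (independent modular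
-- exponentiations), instead of A's stateful squaring chain plus bits-list-and-fold (objective: alternative).

-- ===== PORT A =====
-- `out = (out << 1) | bit` ported with Int shiftLeft / PySem.Int.bor; exact: Python's << and |
-- on ints are arbitrary-precision bitwise ops, as are these.
def valueFromBits (bits : List Int) : Int :=
  bits.foldl (fun out bit => PySem.Int.bor (out <<< (1 : Nat)) bit) 0

-- loop body of A's `for i in range(8)`
def pvStepA (pq : Int) (st : Int × List Int) : Int × List Int :=
  let nv := PySem.Int.mod (st.1 ^ 2) pq
  (nv, st.2 ++ [PySem.Int.mod nv 2])

def blumBlumShub (currentValue : Int) : Int × Int :=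
  let p : Int := 1898749
  let q : Int := 19891
  let newValue : Int := currentValue  -- int(currentValue) on an int is the identity
  let st := (List.range 8).foldl (fun st _ => pvStepA (p * q) st) (newValue, [])
  (st.1, valueFromBits st.2)

-- ===== PORT B =====
def blumBlumShub_alt (currentValue : Int) : Int × Int :=
  let m : Int := 1898749 * 19891
  let x : Int := currentValue  -- int(currentValue) on an int is the identity
  let newValue := PySem.Int.powMod x 256 m
  let randValue :=
    ((List.range 8).map (fun i => PySem.Int.mod (PySem.Int.powMod x (2 ^ (i + 1)) m) 2 * 2 ^ (7 - i))).sum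
  (newValue, randValue)

-- ===== PRECONDITION & SPEC =====
def Spec_blumBlumShub (currentValue : Int) (out : Int × Int) : Prop := out = blumBlumShub_alt currentValue
instance (currentValue : Int) (out : Int × Int) : Decidable (Spec_blumBlumShub currentValue out) := by unfold Spec_blumBlumShub; infer_instance

-- ===== CLAIM (what is proved, stated in full; the proofs are below) =====
def Claim_equal_blumBlumShub : Prop := ∀ (currentValue : Int), Dom_blumBlumShub currentValue → Spec_blumBlumShub currentValue (blumBlumShub currentValue)

-- ===== LEMMAS AND PROOFS =====

-- `(o << 1) | b` equals `o * 2 + b` for a nonnegative accumulator and a bit b ∈ {0,1}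
theorem pv_bor_step (o b : Int) (ho : 0 ≤ o) (hb : b = 0 ∨ b = 1) :
    PySem.Int.bor (o <<< (1 : Nat)) b = o * 2 + b := by
  lift o to ℕ using ho
  have hsh : ((o : Int) <<< (1 : Nat)) = ((2 * o : Nat) : Int) := by
    rw [Int.shiftLeft_eq]
    push_cast
    ring
  rcases hb with rfl | rfl
  · rw [hsh]; simp only [PySem.Int.bor_zero]; push_cast; ring
  · rw [hsh, show ((1 : Int)) = ((1 : Nat) : Int) from rfl, PySem.Int.bor_natCast]
    have h2 : (2 * o) ||| 1 = 2 * o + 1 := by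
      have := Nat.lor_bit false o true 0
      simpa [Nat.bit, Nat.mul_comm] using this
    rw [h2]; push_cast; ring

-- on a 0/1 list the lor-fold is the plain arithmetic fold o*2+b
theorem pv_vfb_arith (bits : List Int) (h : ∀ b ∈ bits, b = 0 ∨ b = 1) :
    valueFromBits bits = bits.foldl (fun o b => o * 2 + b) 0 := by
  unfold valueFromBits
  suffices H : ∀ (acc : Int), 0 ≤ acc →
      bits.foldl (fun out bit => PySem.Int.bor (out <<< (1 : Nat)) bit) acc
        = bits.foldl (fun o b => o * 2 + b) acc from H 0 le_rfl
  induction bits with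
  | nil => intro acc _; rfl
  | cons b bs ih =>
    intro acc hacc
    have hb := h b (List.mem_cons_self ..)
    simp only [List.foldl_cons]
    rw [pv_bor_step acc b hacc hb]
    exact ih (fun x hx => h x (List.mem_cons_of_mem _ hx)) _ (by rcases hb with rfl | rfl <;> omega)

-- squaring under a positive modulus: mod ((mod a m)^2) m = mod (a^2) m
theorem pv_modsq (a m : Int) (hm : 0 < m) :
    PySem.Int.mod ((PySem.Int.mod a m) ^ 2) m = PySem.Int.mod (a ^ 2) m := by
  simp only [PySem.Int.mod_eq_emod_of_pos hm]
  rw [sq, sq, ← Int.mul_emod]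

-- A's chain in closed form: after n steps the value is x^(2^n) mod m and
-- the bits list is [x^(2^(i+1)) mod m mod 2 | i < n]
theorem pv_chainA (m x : Int) (hm : 0 < m) (n : Nat) :
    (List.range n).foldl (fun st _ => pvStepA m st) (x, [])
      = ((if n = 0 then x else PySem.Int.mod (x ^ (2 ^ n)) m),
         (List.range n).map (fun i => PySem.Int.mod (PySem.Int.mod (x ^ (2 ^ (i + 1))) m) 2)) := by
  induction n with
  | zero => simp
  | succ k ih =>
    rw [List.range_succ, List.foldl_append, ih]
    simp only [List.foldl_cons, List.foldl_nil, pvStepA, List.map_append, List.map_cons,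
      List.map_nil]
    rcases Nat.eq_zero_or_pos k with rfl | hk
    · norm_num
    · have hk0 : ¬ (k = 0) := by omega
      have hk1 : ¬ (k + 1 = 0) := by omega
      simp only [hk0, hk1, if_false]
      have : PySem.Int.mod ((PySem.Int.mod (x ^ 2 ^ k) m) ^ 2) m
          = PySem.Int.mod (x ^ 2 ^ (k + 1)) m := by
        rw [pv_modsq _ _ hm, ← pow_mul, ← pow_succ]
      rw [this]

-- ===== VERDICT (by name: the statement is the Claim_ definition above) =====
theorem blumBlumShub_spec : Claim_equal_blumBlumShub := by
  intro cv _
  unfold Spec_blumBlumShub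
  have hm : (0 : Int) < 1898749 * 19891 := by norm_num
  simp only [blumBlumShub, blumBlumShub_alt]
  rw [pv_chainA _ cv hm 8]
  have hbits : ∀ b ∈ (List.range 8).map
      (fun i => PySem.Int.mod (PySem.Int.mod (cv ^ (2 ^ (i + 1))) (1898749 * 19891)) 2),
      b = 0 ∨ b = 1 := by
    intro b hb
    simp only [List.mem_map] at hb
    obtain ⟨i, _, rfl⟩ := hb
    exact PySem.Int.mod_two_eq _
  refine Prod.ext ?_ ?_
  · norm_num [PySem.Int.powMod]
  · show valueFromBits _ = _
    rw [pv_vfb_arith _ hbits]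
    simp only [PySem.Int.powMod, List.range_succ, List.range_zero, List.map_cons,
      List.map_nil, List.nil_append, List.cons_append, List.foldl_cons, List.foldl_nil,
      List.sum_cons, List.sum_nil]
    norm_num
    ring
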